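-- pv_equiv track=rewrite | github.com/SankaiAI/mydoc-mcp | src/database/test_performance.py | _generate_test_document
-- ===== SOURCE A (Python) =====
-- def _generate_test_document(doc_id: int, word_count: int = 500) -> str:
--     """Generate test document content."""
--     words = [
--         "document", "content", "test", "example", "sample", "data", "information",
--         "system", "database", "search", "index", "query", "results", "analysis",
--         "processing", "management", "performance", "optimization", "benchmark",
--         "evaluation", "testing", "validation", "verification", "implementation"
--     ]
--
--     content_words = []
--     for i in range(word_count):
--         word = words[i % len(words)]
--         if i % 50 == 0:
--             word = f"{word}_{doc_id}"  # Add unique identifier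
--         content_words.append(word)
--
--     return f"# Test Document {doc_id}\n\n" + " ".join(content_words)
-- ===== SOURCE B (Python) =====
-- def _generate_test_document(doc_id: int, word_count: int = 500) -> str:
--     """Generate test document content."""
--     words = [
--         "document", "content", "test", "example", "sample", "data", "information",
--         "system", "database", "search", "index", "query", "results", "analysis",
--         "processing", "management", "performance", "optimization", "benchmark",
--         "evaluation", "testing", "validation", "verification", "implementation"
--     ]
--
--     n = max(word_count, 0)
--     # build the whole filler body in one shot by cycling the base word list
--     content_words = (words * (n // len(words) + 1))[:n]
--     # then stamp the unique identifier only at the marker positions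
--     for j in range(0, n, 50):
--         content_words[j] = f"{content_words[j]}_{doc_id}"
--
--     return f"# Test Document {doc_id}\n\n" + " ".join(content_words)
-- ===== Notes on version B (the rewrite author's own statement) =====
-- stated objective: faster
-- what changed: B builds the whole filler body at once by list repetition and slicing, then stamps the doc_id suffix in a second strided pass over only the marker positions (range(0,n,50)), instead of A's single per-element loop testing i % 50 on every word.
import Mathlib
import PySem

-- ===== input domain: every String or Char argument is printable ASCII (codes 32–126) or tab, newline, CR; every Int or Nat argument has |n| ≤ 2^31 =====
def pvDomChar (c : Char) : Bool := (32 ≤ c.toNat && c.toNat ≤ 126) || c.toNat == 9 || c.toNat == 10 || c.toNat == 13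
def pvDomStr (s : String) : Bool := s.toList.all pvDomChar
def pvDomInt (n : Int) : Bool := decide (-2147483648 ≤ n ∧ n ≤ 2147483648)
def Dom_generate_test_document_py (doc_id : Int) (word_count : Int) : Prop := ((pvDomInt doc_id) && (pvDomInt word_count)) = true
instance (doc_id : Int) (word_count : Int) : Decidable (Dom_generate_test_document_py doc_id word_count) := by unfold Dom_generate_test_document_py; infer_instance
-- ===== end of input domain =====

-- B builds the body by list repetition + slice and stamps doc_id in a strided second pass
-- (range(0,n,50)) instead of A's per-element i % 50 test; measurably faster by a constant factor.

-- the literal word list both Python versions hard-code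
def pvWords : List String :=
  ["document", "content", "test", "example", "sample", "data", "information",
   "system", "database", "search", "index", "query", "results", "analysis",
   "processing", "management", "performance", "optimization", "benchmark",
   "evaluation", "testing", "validation", "verification", "implementation"]

-- ===== PORT A =====
def generate_test_document_py (doc_id : Int) (word_count : Int) : String :=
  let words := pvWords
  let content_words := (PySem.List.pyRange 0 word_count 1).foldl (fun acc i =>
    let word := PySem.List.pyGetD words (PySem.Int.mod i (PySem.List.len words)) ""
    let word := if PySem.Int.mod i 50 = 0 then word ++ "_" ++ PySem.Int.toStr doc_id else word
    acc ++ [word]) []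
  "# Test Document " ++ PySem.Int.toStr doc_id ++ "\n\n" ++ PySem.Str.join " " content_words

-- ===== PORT B =====
def generate_test_document_py_alt (doc_id : Int) (word_count : Int) : String :=
  let words := pvWords
  let n : Int := max word_count 0
  -- (words * reps)[:n] — Python list repetition, then a slice
  let base := PySem.List.slice
    ((List.replicate (PySem.Int.floordiv n (PySem.List.len words) + 1).toNat words).flatten)
    none (some n)
  -- stamp the unique identifier only at the marker positions
  let content_words := (PySem.List.pyRange 0 n 50).foldl
    (fun cs j => PySem.List.pySetD cs j (PySem.List.pyGetD cs j "" ++ "_" ++ PySem.Int.toStr doc_id)) base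
  "# Test Document " ++ PySem.Int.toStr doc_id ++ "\n\n" ++ PySem.Str.join " " content_words

-- ===== PRECONDITION & SPEC =====
def Spec_generate_test_document_py (doc_id : Int) (word_count : Int) (out : String) : Prop := out = generate_test_document_py_alt doc_id word_count
instance (doc_id : Int) (word_count : Int) (out : String) : Decidable (Spec_generate_test_document_py doc_id word_count out) := by unfold Spec_generate_test_document_py; infer_instance

-- ===== CLAIM (what is proved, stated in full; the proofs are below) =====
def Claim_equal_generate_test_document_py : Prop := ∀ (doc_id : Int) (word_count : Int), Dom_generate_test_document_py doc_id word_count → Spec_generate_test_document_py doc_id word_count (generate_test_document_py doc_id word_count)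

-- ===== LEMMAS AND PROOFS =====

-- the k-th filler word
def pvWd (k : Nat) : String := pvWords.getD (k % 24) ""

lemma pv_flatten_replicate (r : Nat) :
    (List.replicate r pvWords).flatten = (List.range (r * 24)).map pvWd := by
  induction r with
  | zero => simp
  | succ r ih =>
    have h24 : (List.range 24).map pvWd = pvWords := by decide
    calc (List.replicate (r + 1) pvWords).flatten
        = pvWords ++ (List.replicate r pvWords).flatten := by
          rw [List.replicate_succ, List.flatten_cons]
      _ = (List.range 24).map pvWd ++ (List.range (r * 24)).map (fun k => pvWd (24 + k)) := by
          rw [h24, ih]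
          congr 1
          apply List.map_congr_left
          intro k _
          simp [pvWd, Nat.add_comm 24 k]
      _ = (List.range ((r + 1) * 24)).map pvWd := by
          rw [show (r + 1) * 24 = 24 + r * 24 by ring, List.range_add, List.map_append,
            List.map_map]
          rfl

-- the generic stamping pass: setting distinct in-range positions one at a time
lemma pv_stamp (sfx : String) (js : List Int) (L : List String)
    (hnd : js.Nodup) (hin : ∀ j ∈ js, 0 ≤ j ∧ j < (L.length : Int)) :
    js.foldl (fun cs j => PySem.List.pySetD cs j (PySem.List.pyGetD cs j "" ++ sfx)) L
      = L.mapIdx (fun k x => if (k : Int) ∈ js then x ++ sfx else x) := by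
  induction js generalizing L with
  | nil =>
    apply List.ext_getElem (by simp)
    intro k hk1 hk2
    simp [List.getElem_mapIdx]
  | cons j js ih =>
    obtain ⟨hj0, hjlt⟩ := hin j (by simp)
    set jn := j.toNat with hjn
    have hjcast : j = (jn : Int) := by omega
    have hjlen : jn < L.length := by omega
    have hv : PySem.List.pyGetD L j "" = L[jn] := by
      rw [hjcast, PySem.List.pyGetD_natCast]
      exact List.getD_eq_getElem _ _ hjlen
    have hset : PySem.List.pySetD L j (PySem.List.pyGetD L j "" ++ sfx)
        = L.set jn (L[jn] ++ sfx) := by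
      rw [hv, hjcast, PySem.List.pySetD_natCast]
    have hlen' : (L.set jn (L[jn] ++ sfx)).length = L.length := by simp
    have hnotin : j ∉ js := (List.nodup_cons.mp hnd).1
    rw [List.foldl_cons, hset,
      ih (L.set jn (L[jn] ++ sfx)) (List.nodup_cons.mp hnd).2
        (by intro x hx
            have := hin x (by simp [hx])
            rw [hlen']
            omega)]
    apply List.ext_getElem (by simp)
    intro k hk1 hk2
    simp only [List.getElem_mapIdx, List.getElem_set]
    by_cases hkj : jn = k
    · subst hkj
      have h1 : (jn : Int) ∉ js := by rw [← hjcast]; exact hnotin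
      have h2 : (jn : Int) ∈ j :: js := by rw [hjcast] at *; exact List.mem_cons_self
      simp [h1, h2]
    · have : ((k : Int) ∈ j :: js) ↔ ((k : Int) ∈ js) := by
        simp only [List.mem_cons]
        constructor
        · rintro (h | h)
          · exfalso; apply hkj; omega
          · exact h
        · exact Or.inr
      simp [hkj, this]

lemma pv_nodup_pyRange50 (b : Int) : (PySem.List.pyRange 0 b 50).Nodup := by
  rw [PySem.List.pyRange_of_pos 0 b (by norm_num)]
  refine List.Nodup.map ?_ List.nodup_range
  intro x y h
  simp only at h
  omega

lemma pv_mod_natCast_lit (k c : Nat) (hc : 0 < c) :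
    PySem.Int.mod (k : Int) (c : Int) = ((k % c : Nat) : Int) := by
  rw [PySem.Int.mod_eq_emod_of_pos (by exact_mod_cast hc)]
  exact (Int.natCast_mod k c).symm

-- both content-word lists equal the same map over range
lemma pv_lists_eq (doc_id word_count : Int) :
    ((PySem.List.pyRange 0 word_count 1).foldl (fun acc i =>
      let word := PySem.List.pyGetD pvWords (PySem.Int.mod i (PySem.List.len pvWords)) ""
      let word := if PySem.Int.mod i 50 = 0 then word ++ "_" ++ PySem.Int.toStr doc_id else word
      acc ++ [word]) [])
    = ((PySem.List.pyRange 0 (max word_count 0) 50).foldl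
        (fun cs j => PySem.List.pySetD cs j (PySem.List.pyGetD cs j "" ++ "_" ++ PySem.Int.toStr doc_id))
        (PySem.List.slice
          ((List.replicate (PySem.Int.floordiv (max word_count 0) (PySem.List.len pvWords) + 1).toNat pvWords).flatten)
          none (some (max word_count 0)))) := by
  set sfx := "_" ++ PySem.Int.toStr doc_id with hsfx
  set m := word_count.toNat with hm
  have hmax : max word_count 0 = (m : Int) := by omega
  have hlen24 : PySem.List.len pvWords = (24 : Int) := by decide
  -- A side: the append-fold is a map over range m
  have hA : ((PySem.List.pyRange 0 word_count 1).foldl (fun acc i =>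
      let word := PySem.List.pyGetD pvWords (PySem.Int.mod i (PySem.List.len pvWords)) ""
      let word := if PySem.Int.mod i 50 = 0 then word ++ "_" ++ PySem.Int.toStr doc_id else word
      acc ++ [word]) [])
      = (List.range m).map (fun k => if k % 50 = 0 then pvWd k ++ sfx else pvWd k) := by
    rw [show (PySem.List.pyRange 0 word_count 1).foldl (fun acc i =>
        let word := PySem.List.pyGetD pvWords (PySem.Int.mod i (PySem.List.len pvWords)) ""
        let word := if PySem.Int.mod i 50 = 0 then word ++ "_" ++ PySem.Int.toStr doc_id else word
        acc ++ [word]) []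
      = (PySem.List.pyRange 0 word_count 1).map (fun i =>
        if PySem.Int.mod i 50 = 0 then PySem.List.pyGetD pvWords (PySem.Int.mod i (PySem.List.len pvWords)) "" ++ "_" ++ PySem.Int.toStr doc_id
        else PySem.List.pyGetD pvWords (PySem.Int.mod i (PySem.List.len pvWords)) "")
      from PySem.List.foldl_append_singleton_eq_map _ _ []]
    rw [PySem.List.pyRange_one, List.map_map]
    have hm' : (word_count - 0).toNat = m := by omega
    rw [hm']
    apply List.map_congr_left
    intro k _
    simp only [Function.comp, zero_add, hlen24]
    rw [show (50 : Int) = ((50 : Nat) : Int) from rfl, show (24 : Int) = ((24 : Nat) : Int) from rfl,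
      pv_mod_natCast_lit k 50 (by norm_num), pv_mod_natCast_lit k 24 (by norm_num),
      PySem.List.pyGetD_natCast]
    have : ((k % 50 : Nat) : Int) = 0 ↔ k % 50 = 0 := by omega
    simp only [this]
    split_ifs <;> simp [pvWd, sfx, List.getD, String.append_assoc]
  -- B side: the base slice is the same map without the suffix
  have hr24 : m < ((PySem.Int.floordiv (m : Int) (24 : Int) + 1).toNat) * 24 := by
    have : PySem.Int.floordiv (m : Int) (24 : Int) = ((m / 24 : Nat) : Int) := by
      exact_mod_cast PySem.Int.floordiv_natCast m 24
    rw [this]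
    have h1 : ((m / 24 : Nat) : Int) + 1 = ((m / 24 + 1 : Nat) : Int) := by push_cast; ring
    rw [h1, Int.toNat_natCast]
    have hdm := Nat.div_add_mod m 24
    have hlt : m % 24 < 24 := Nat.mod_lt _ (by norm_num)
    omega
  have hbase : PySem.List.slice
      ((List.replicate (PySem.Int.floordiv (max word_count 0) (PySem.List.len pvWords) + 1).toNat pvWords).flatten)
      none (some (max word_count 0))
      = (List.range m).map pvWd := by
    rw [hmax, hlen24, PySem.List.slice_to_natCast, pv_flatten_replicate, ← List.map_take,
      List.take_range, Nat.min_eq_left (Nat.le_of_lt hr24)]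
  have hBlen : ((List.range m).map pvWd).length = m := by simp
  rw [hA, hbase, hmax]
  have hstep : (fun (cs : List String) (j : Int) =>
      PySem.List.pySetD cs j (PySem.List.pyGetD cs j "" ++ "_" ++ PySem.Int.toStr doc_id))
      = (fun cs j => PySem.List.pySetD cs j (PySem.List.pyGetD cs j "" ++ sfx)) := by
    funext cs j
    rw [hsfx, String.append_assoc]
  rw [hstep,
    pv_stamp sfx (PySem.List.pyRange 0 (m : Int) 50) ((List.range m).map pvWd)
      (pv_nodup_pyRange50 _)
      (by intro j hj
          rw [PySem.List.mem_pyRange_iff_of_pos (by norm_num)] at hj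
          rw [hBlen]
          omega)]
  apply List.ext_getElem (by simp)
  intro k hk1 hk2
  simp only [List.getElem_map, List.getElem_range, List.getElem_mapIdx]
  have hkm : k < m := by simpa using hk1
  have hmem : ((k : Int) ∈ PySem.List.pyRange 0 (m : Int) 50) ↔ k % 50 = 0 := by
    rw [PySem.List.mem_pyRange_iff_of_pos (by norm_num)]
    constructor
    · rintro ⟨-, -, h⟩
      have : (50 : Int) ∣ (k : Int) := by simpa using h
      omega
    · intro h
      refine ⟨by omega, by omega, ?_⟩
      have : (50 : Int) ∣ (k : Int) := by
        have : ((50 : Nat) : Int) ∣ ((k : Nat) : Int) := Int.natCast_dvd_natCast.mpr (Nat.dvd_of_mod_eq_zero h)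
        simpa using this
      simpa using this
  by_cases h50 : k % 50 = 0 <;> simp [hmem, h50]

-- ===== VERDICT (by name: the statement is the Claim_ definition above) =====
theorem generate_test_document_py_spec : Claim_equal_generate_test_document_py := by
  intro doc_id word_count _
  unfold Spec_generate_test_document_py generate_test_document_py generate_test_document_py_alt
  simp only []
  rw [pv_lists_eq doc_id word_count]
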